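-- pv_equiv track=rewrite | github.com/lcasassa/f1_lights | tools/blink_preview.py | simulate_blink
-- ===== SOURCE A (Python) =====
-- BLINK_INTERVAL_MS = 500
--
-- def simulate_blink(total_ms: int = 3000) -> list[str]:
--     state = "OFF"
--     events: list[str] = [f"t=0ms -> {state}"]
--
--     elapsed = BLINK_INTERVAL_MS
--     while elapsed <= total_ms:
--         state = "ON" if state == "OFF" else "OFF"
--         events.append(f"t={elapsed}ms -> {state}")
--         elapsed += BLINK_INTERVAL_MS
--
--     return events
-- ===== SOURCE B (Python) =====
-- BLINK_INTERVAL_MS = 500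
--
-- def simulate_blink(total_ms: int = 3000) -> list[str]:
--     count = max(total_ms // BLINK_INTERVAL_MS, 0)
--     return [f"t={i * BLINK_INTERVAL_MS}ms -> {'ON' if i % 2 else 'OFF'}"
--             for i in range(count + 1)]
-- ===== Notes on version B (the rewrite author's own statement) =====
-- stated objective: simpler
-- what changed: Replaces the sequential while-loop that toggles a maintained state variable with a closed-form count (total_ms // 500, clamped at 0) and a single comprehension deriving each event's ON/OFF state from index parity.
import Mathlib
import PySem

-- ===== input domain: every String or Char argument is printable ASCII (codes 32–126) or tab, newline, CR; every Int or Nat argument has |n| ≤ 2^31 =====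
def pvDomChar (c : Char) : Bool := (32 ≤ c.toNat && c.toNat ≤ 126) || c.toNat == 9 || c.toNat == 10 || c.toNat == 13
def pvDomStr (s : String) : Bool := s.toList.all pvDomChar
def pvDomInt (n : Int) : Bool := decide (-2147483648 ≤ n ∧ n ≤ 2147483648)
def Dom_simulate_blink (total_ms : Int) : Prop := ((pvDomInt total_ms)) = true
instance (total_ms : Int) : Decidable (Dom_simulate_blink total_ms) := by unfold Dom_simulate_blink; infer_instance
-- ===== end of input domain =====

-- B replaces A's state-toggling while-loop with a closed-form event count and an
-- index-parity comprehension (objective: simpler).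

-- ===== PORT A =====
-- the while loop of A, step for step: state toggles, event appended, elapsed += 500
def blinkLoop (total_ms : Int) (state : String) (elapsed : Int) (events : List String) : List String :=
  if _h : elapsed ≤ total_ms then
    let state' := if state = "OFF" then "ON" else "OFF"
    blinkLoop total_ms state' (elapsed + 500)
      (events ++ ["t=" ++ PySem.Int.toStr elapsed ++ "ms -> " ++ state'])
  else events
termination_by (total_ms + 500 - elapsed).toNat
decreasing_by omega

def simulate_blink (total_ms : Int) : List String :=
  let state := "OFF"
  let events : List String := ["t=0ms -> " ++ state]
  blinkLoop total_ms state 500 events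

-- ===== PORT B =====
def simulate_blink_alt (total_ms : Int) : List String :=
  let count := max (PySem.Int.floordiv total_ms 500) 0
  (PySem.List.pyRange 0 (count + 1) 1).map (fun i =>
    "t=" ++ PySem.Int.toStr (i * 500) ++ "ms -> " ++ (if i % 2 ≠ 0 then "ON" else "OFF"))

-- ===== PRECONDITION & SPEC =====
def Spec_simulate_blink (total_ms : Int) (out : List String) : Prop := out = simulate_blink_alt total_ms
instance (total_ms : Int) (out : List String) : Decidable (Spec_simulate_blink total_ms out) := by unfold Spec_simulate_blink; infer_instance

-- ===== CLAIM (what is proved, stated in full; the proofs are below) =====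
def Claim_equal_simulate_blink : Prop := ∀ (total_ms : Int), Dom_simulate_blink total_ms → Spec_simulate_blink total_ms (simulate_blink total_ms)

-- ===== LEMMAS AND PROOFS =====

-- B's per-index event string
def blinkEvt (i : Int) : String :=
  "t=" ++ PySem.Int.toStr (i * 500) ++ "ms -> " ++ (if i % 2 ≠ 0 then "ON" else "OFF")

-- the state A holds after i toggles is B's parity state for index i
theorem blinkEvt_state (i : Int) (_hi : 1 ≤ i) :
    (if (if (i - 1) % 2 ≠ 0 then "ON" else "OFF") = "OFF" then "ON" else "OFF")
      = (if i % 2 ≠ 0 then "ON" else "OFF") := by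
  have h2 : i % 2 = 0 ∨ i % 2 = 1 := by omega
  rcases h2 with h | h
  · simp [h, show (i - 1) % 2 = 1 by omega]
  · simp [h, show (i - 1) % 2 = 0 by omega]

-- loop invariant: entering with elapsed = j*500 and state of index j-1, the loop
-- appends exactly B's events for indices j .. count
theorem blinkLoop_eq (total : Int) :
    ∀ (n : Nat) (j : Int) (events : List String), 1 ≤ j →
      n = (max (PySem.Int.floordiv total 500) 0 + 1 - j).toNat →
      blinkLoop total (if (j - 1) % 2 ≠ 0 then "ON" else "OFF") (j * 500) events
        = events ++ (PySem.List.pyRange j (max (PySem.Int.floordiv total 500) 0 + 1) 1).map blinkEvt := by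
  intro n
  induction n with
  | zero =>
      intro j events hj hn
      have hC : max (PySem.Int.floordiv total 500) 0 + 1 ≤ j := by omega
      have hle : ¬ (j * 500 ≤ total) := by
        intro h
        have : j ≤ PySem.Int.floordiv total 500 :=
          (PySem.Int.le_floordiv_iff_mul_le (a := total) (b := 500) (q := j) (by omega)).mpr h
        omega
      rw [blinkLoop, dif_neg hle, PySem.List.pyRange_one_eq_nil hC]
      simp
  | succ n ih =>
      intro j events hj hn
      by_cases h : j * 500 ≤ total
      · have hjC : j ≤ PySem.Int.floordiv total 500 :=
          (PySem.Int.le_floordiv_iff_mul_le (a := total) (b := 500) (q := j) (by omega)).mpr h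
        have hlt : j < max (PySem.Int.floordiv total 500) 0 + 1 := by omega
        rw [blinkLoop, dif_pos h]
        simp only [blinkEvt_state j hj]
        have step := ih (j + 1)
          (events ++ ["t=" ++ PySem.Int.toStr (j * 500) ++ "ms -> "
                        ++ (if j % 2 ≠ 0 then "ON" else "OFF")])
          (by omega) (by omega)
        have harg : (j + 1 - 1) % 2 = j % 2 := by omega
        rw [harg] at step
        have hmul : j * 500 + 500 = (j + 1) * 500 := by ring
        rw [hmul, step, PySem.List.pyRange_one_cons hlt]
        simp [blinkEvt]
      · have hC : max (PySem.Int.floordiv total 500) 0 + 1 ≤ j := by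
          by_contra hc
          have : j ≤ PySem.Int.floordiv total 500 := by omega
          exact h ((PySem.Int.le_floordiv_iff_mul_le (a := total) (b := 500) (q := j) (by omega)).mp this)
        rw [blinkLoop, dif_neg h, PySem.List.pyRange_one_eq_nil hC]
        simp

-- ===== VERDICT (by name: the statement is the Claim_ definition above) =====
theorem simulate_blink_spec : Claim_equal_simulate_blink := by
  intro total _
  unfold Spec_simulate_blink simulate_blink simulate_blink_alt
  simp only []
  have hC0 : (0 : Int) < max (PySem.Int.floordiv total 500) 0 + 1 := by omega
  rw [PySem.List.pyRange_one_cons hC0, List.map_cons]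
  have hmain := blinkLoop_eq total (max (PySem.Int.floordiv total 500) 0 + 1 - 1).toNat 1
      ["t=0ms -> OFF"] (by omega) rfl
  simp only [show ((1 : Int) - 1) % 2 = 0 from rfl, show (1 : Int) * 500 = 500 from rfl,
    ne_eq, not_true_eq_false, if_false] at hmain
  rw [show ("t=0ms -> " ++ "OFF" : String) = "t=0ms -> OFF" from rfl, hmain]
  simp [blinkEvt]
  decide
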